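-- pv_equiv track=rewrite | github.com/phaustin/gradelib | src/gradelib/make_short_ids.py | create_keydict
-- ===== SOURCE A (Python) =====
-- from collections import defaultdict
--
-- def create_keydict(id_list: list,keylen=3):
--     """
--     create a dictionary of the form
--     short_id:[ubc_id]
--     where the short_id is the last digits of the
--     ubc id, sliced [-keylen:]
--
--     if there is more than 1 id with the same last
--     digits then the entry will be a length of ubc_ids
--     that have those digits in common
--     """
--     shortid_dict =  defaultdict(list)
--     for the_id in id_list:
--         the_key = the_id[-keylen:]
--         shortid_dict[the_key].append(the_id)
--     #
--     #find all keys with multiple ubc_ids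
--     #
--     multi_id_dict = {}
--     short_ids = list(shortid_dict.keys())
--     #
--     # move collided ids to multi_id dict
--     #
--     for new_id in short_ids:
--         if len(shortid_dict[new_id]) > 1:
--             multi_id_dict[new_id]=shortid_dict.pop(new_id)
--     return shortid_dict, multi_id_dict
-- ===== SOURCE B (Python) =====
-- from collections import defaultdict, Counter
--
-- def create_keydict(id_list: list, keylen=3):
--     counts = Counter(the_id[-keylen:] for the_id in id_list)
--     shortid_dict = defaultdict(list)
--     multi_id_dict = {}
--     for the_id in id_list:
--         the_key = the_id[-keylen:]
--         if counts[the_key] > 1: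
--             multi_id_dict.setdefault(the_key, []).append(the_id)
--         else:
--             shortid_dict[the_key].append(the_id)
--     return shortid_dict, multi_id_dict
-- ===== Notes on version B (the rewrite author's own statement) =====
-- stated objective: alternative
-- what changed: B counts suffix keys first (Counter) and then places each id directly into the single-key or collision dict in one pass over id_list, instead of A's group-everything-then-repartition over the grouped dict's keys.
import Mathlib
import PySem

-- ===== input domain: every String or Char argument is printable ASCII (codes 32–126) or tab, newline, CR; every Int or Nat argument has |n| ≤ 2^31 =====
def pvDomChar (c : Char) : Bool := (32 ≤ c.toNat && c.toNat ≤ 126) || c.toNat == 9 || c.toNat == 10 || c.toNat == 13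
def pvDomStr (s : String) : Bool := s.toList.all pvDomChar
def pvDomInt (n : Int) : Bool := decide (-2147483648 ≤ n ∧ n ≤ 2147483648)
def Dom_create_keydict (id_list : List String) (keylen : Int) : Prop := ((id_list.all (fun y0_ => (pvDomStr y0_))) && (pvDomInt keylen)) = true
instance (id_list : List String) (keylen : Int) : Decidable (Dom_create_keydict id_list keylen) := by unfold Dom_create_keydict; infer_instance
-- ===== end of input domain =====

-- B counts suffix keys first and places each id in one pass, instead of A's
-- group-then-repartition; same return value, proved equal (alternative decomposition,
-- no speed claim).

-- ===== PORT A =====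
-- the_id[-keylen:] (both Python versions compute this same expression)
def pvKey (keylen : Int) (the_id : String) : String :=
  String.ofList (PySem.List.slice the_id.toList (some (-keylen)) none)

def create_keydict (id_list : List String) (keylen : Int) :
    (List (String × List String)) × (List (String × List String)) :=
  -- for the_id in id_list: shortid_dict[the_id[-keylen:]].append(the_id)
  let shortid_dict : PySem.Dict String (List String) :=
    id_list.foldl (fun d the_id => d.modify (pvKey keylen the_id) [] (· ++ [the_id]))
      PySem.Dict.empty
  let short_ids := shortid_dict.keys
  -- for new_id in short_ids: if len(shortid_dict[new_id]) > 1: move to multi_id_dict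
  let res :=
    short_ids.foldl
      (fun (p : PySem.Dict String (List String) × PySem.Dict String (List String)) new_id =>
        let v := p.1.getD new_id []
        if 1 < v.length then (p.1.erase new_id, p.2.insert new_id v) else p)
      (shortid_dict, PySem.Dict.empty)
  (res.1.items, res.2.items)

-- ===== PORT B =====
def create_keydict_alt (id_list : List String) (keylen : Int) :
    (List (String × List String)) × (List (String × List String)) :=
  -- counts = Counter(the_id[-keylen:] for the_id in id_list)
  let counts := PySem.Dict.counter (id_list.map (pvKey keylen))
  -- one pass: place each id by its key's total count
  let res :=
    id_list.foldl
      (fun (p : PySem.Dict String (List String) × PySem.Dict String (List String)) the_id =>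
        let the_key := pvKey keylen the_id
        if 1 < counts.getD the_key 0 then
          (p.1, p.2.modify the_key [] (· ++ [the_id]))
        else
          (p.1.modify the_key [] (· ++ [the_id]), p.2))
      (PySem.Dict.empty, PySem.Dict.empty)
  (res.1.items, res.2.items)

-- ===== PRECONDITION & SPEC =====
def Spec_create_keydict (id_list : List String) (keylen : Int) (out : (List (String × List String)) × (List (String × List String))) : Prop := out = create_keydict_alt id_list keylen
instance (id_list : List String) (keylen : Int) (out : (List (String × List String)) × (List (String × List String))) : Decidable (Spec_create_keydict id_list keylen out) := by unfold Spec_create_keydict; infer_instance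

-- ===== CLAIM (what is proved, stated in full; the proofs are below) =====
def Claim_equal_create_keydict : Prop := ∀ (id_list : List String) (keylen : Int), Dom_create_keydict id_list keylen → Spec_create_keydict id_list keylen (create_keydict id_list keylen)

-- ===== LEMMAS AND PROOFS =====

def pvGrp (f : String → String) (d : PySem.Dict String (List String)) (l : List String) :
    PySem.Dict String (List String) :=
  l.foldl (fun d x => d.modify (f x) [] (· ++ [x])) d

theorem pvGrp_getD (f : String → String) (l : List String) (c : String) :
    (pvGrp f PySem.Dict.empty l).getD c [] = l.filter (fun x => f x == c) := by
  have h : pvGrp f PySem.Dict.empty l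
      = (l.map (fun x => (f x, x))).foldl (fun d p => d.modify p.1 [] (· ++ [p.2])) PySem.Dict.empty := by
    simp [pvGrp, List.foldl_map]
  rw [h, PySem.Dict.getD_foldl_modify_append, PySem.Dict.getD_empty]
  simp [List.filter_map, Function.comp_def]

theorem pvGrp_keys (f : String → String) (l : List String) :
    (pvGrp f PySem.Dict.empty l).keys = PySem.Set.ofList (l.map f) := by
  rw [pvGrp, PySem.Dict.keys_foldl_modify_key l f [] (fun _ x => (· ++ [x]))]
  rw [PySem.Dict.keys_empty]
  exact PySem.Set.update_nil_left _

theorem pvGrp_items (f : String → String) (l : List String) :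
    (pvGrp f PySem.Dict.empty l).items
      = (PySem.Set.ofList (l.map f)).map (fun k => (k, l.filter (fun x => f x == k))) := by
  have hnd : (pvGrp f PySem.Dict.empty l).keys.Nodup := by
    rw [pvGrp_keys]; exact PySem.Set.nodup_ofList _
  rw [PySem.Dict.items_eq_map_keys _ hnd [], pvGrp_keys]
  exact List.map_congr_left (fun k _ => by rw [pvGrp_getD])

theorem get?_mk_append (pre rest : List (String × List String)) (k : String) (v : List String)
    (h : k ∉ pre.map Prod.fst) :
    (PySem.Dict.mk (pre ++ (k, v) :: rest)).get? k = some v := by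
  induction pre with
  | nil => simp [PySem.Dict.get?_mk_cons]
  | cons q pre ih =>
    rw [List.cons_append, PySem.Dict.get?_mk_cons]
    simp only [List.map_cons, List.mem_cons, not_or] at h
    rw [if_neg (by simp only [beq_iff_eq]; exact fun hq => h.1 hq.symm)]
    exact ih h.2
theorem erase_mk_append (pre rest : List (String × List String)) (k : String) (v : List String)
    (h1 : k ∉ pre.map Prod.fst) (h2 : k ∉ rest.map Prod.fst) :
    (PySem.Dict.mk (pre ++ (k, v) :: rest)).erase k = PySem.Dict.mk (pre ++ rest) := by
  show PySem.Dict.mk (((pre ++ (k, v) :: rest)).filter fun p => !p.1 == k) = _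
  congr 1
  rw [List.filter_append, List.filter_cons]
  rw [if_neg (by simp)]
  rw [List.filter_eq_self.2, List.filter_eq_self.2]
  · intro p hp
    have : p.1 ≠ k := fun e => h2 (e ▸ List.mem_map_of_mem hp)
    simp [this]
  · intro p hp
    have : p.1 ≠ k := fun e => h1 (e ▸ List.mem_map_of_mem hp)
    simp [this]

theorem phase2 (its : List (String × List String)) :
    ∀ (pre : List (String × List String)) (m : PySem.Dict String (List String)),
    ((pre ++ its).map Prod.fst).Nodup →
    (∀ q ∈ its, m.contains q.1 = false) →
    (its.map Prod.fst).foldl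
      (fun (p : PySem.Dict String (List String) × PySem.Dict String (List String)) new_id =>
        let v := p.1.getD new_id []
        if 1 < v.length then (p.1.erase new_id, p.2.insert new_id v) else p)
      (PySem.Dict.mk (pre ++ its), m)
    = (PySem.Dict.mk (pre ++ its.filter (fun q => !decide (1 < q.2.length))),
       PySem.Dict.mk (m.items ++ its.filter (fun q => decide (1 < q.2.length)))) := by
  induction its with
  | nil => intro pre m _ _; simp
  | cons q rest ih =>
    obtain ⟨k, v⟩ := q
    intro pre m hnd hm
    have hnd' : (k :: (pre.map Prod.fst ++ rest.map Prod.fst)).Nodup := by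
      rw [List.map_append, List.map_cons] at hnd
      exact List.nodup_middle.1 hnd
    have hkpre : k ∉ pre.map Prod.fst := fun h => (List.nodup_cons.1 hnd').1 (List.mem_append.2 (Or.inl h))
    have hkrest : k ∉ rest.map Prod.fst := fun h => (List.nodup_cons.1 hnd').1 (List.mem_append.2 (Or.inr h))
    have hndpr : ((pre ++ rest).map Prod.fst).Nodup := by
      rw [List.map_append]; exact (List.nodup_cons.1 hnd').2
    have hgetD : (PySem.Dict.mk (pre ++ (k, v) :: rest)).getD k [] = v := by
      rw [PySem.Dict.getD_eq_get?_getD, get?_mk_append _ _ _ _ hkpre]; rfl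
    rw [List.map_cons, List.foldl_cons]
    simp only [hgetD]
    by_cases hv : 1 < v.length
    · rw [if_pos hv]
      have hmins : m.insert k v = PySem.Dict.mk (m.items ++ [(k, v)]) :=
        PySem.Dict.ext (PySem.Dict.items_insert_of_not_contains m v (hm (k, v) List.mem_cons_self))
      rw [erase_mk_append _ _ _ _ hkpre hkrest, hmins]
      rw [ih pre (PySem.Dict.mk (m.items ++ [(k, v)])) hndpr ?_]
      · simp [hv, List.append_assoc]
      · intro q hq
        rw [PySem.Dict.contains_mk, List.any_append]
        have h1 : m.items.any (fun p => p.1 == q.1) = false := by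
          have := hm q (List.mem_cons_of_mem _ hq)
          rwa [show m.contains q.1 = m.items.any (fun p => p.1 == q.1) from PySem.Dict.contains_mk _ _] at this
        have h2 : k ≠ q.1 := fun e => hkrest (e ▸ List.mem_map_of_mem hq)
        simp [h1, h2]
    · rw [if_neg hv]
      have hre : pre ++ (k, v) :: rest = (pre ++ [(k, v)]) ++ rest := by simp
      rw [hre, ih (pre ++ [(k, v)]) m (by rwa [← hre]) (fun q hq => hm q (List.mem_cons_of_mem _ hq))]
      simp [hv, List.append_assoc]

theorem phase1B (f : String → String) (c : String → Bool) (l : List String) :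
    ∀ (s m : PySem.Dict String (List String)),
    l.foldl
      (fun (p : PySem.Dict String (List String) × PySem.Dict String (List String)) x =>
        if c x then (p.1, p.2.modify (f x) [] (· ++ [x]))
        else (p.1.modify (f x) [] (· ++ [x]), p.2))
      (s, m)
    = (pvGrp f s (l.filter (fun x => !c x)), pvGrp f m (l.filter c)) := by
  induction l with
  | nil => intro s m; simp [pvGrp]
  | cons x l ih =>
    intro s m
    rw [List.foldl_cons]
    by_cases hc : c x
    · simp only [hc, List.filter_cons, Bool.not_true, if_true, Bool.false_eq_true, if_false, ih]
      simp [pvGrp]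
    · have hc' : c x = false := by simpa using hc
      simp only [hc', List.filter_cons, Bool.not_false, if_true, Bool.false_eq_true, if_false, ih]
      simp [pvGrp]

theorem ofList_filter (P : String → Bool) (xs : List String) :
    PySem.Set.ofList (xs.filter P) = (PySem.Set.ofList xs).filter P := by
  induction xs with
  | nil => rfl
  | cons x xs ih =>
    rw [List.filter_cons, PySem.Set.ofList_cons]
    by_cases hP : P x
    · rw [if_pos hP, PySem.Set.ofList_cons, ih]
      show x :: (_ : List String).filter _ = List.filter P (x :: _)
      rw [List.filter_cons, if_pos hP]
      show _ :: List.filter _ (List.filter _ _) = _ :: List.filter _ (List.filter _ _)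
      rw [List.filter_filter, List.filter_filter]
      congr 1
      apply List.filter_congr
      intro y _; exact Bool.and_comm _ _
    · have hP' : P x = false := by simpa using hP
      rw [if_neg (by simp [hP']), ih]
      rw [show List.filter P (x :: (PySem.Set.ofList xs).discard x)
            = List.filter P ((PySem.Set.ofList xs).discard x) from by
        rw [List.filter_cons]; simp [hP']]
      show List.filter P (PySem.Set.ofList xs)
        = List.filter P (List.filter (fun y => !y == x) (PySem.Set.ofList xs))
      rw [List.filter_filter]
      apply List.filter_congr
      intro y _
      by_cases hy : y == x
      · have : y = x := by simpa using hy
        simp [this, hP']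
      · simp only [Bool.not_eq_true] at hy
        simp [hy]

theorem split_lemma (f : String → String) (l : List String) (P : String → Bool)
    (Q : List String → Bool)
    (hPQ : ∀ k, P k = Q (l.filter (fun x => f x == k))) :
    (pvGrp f PySem.Dict.empty (l.filter (fun x => P (f x)))).items
      = (pvGrp f PySem.Dict.empty l).items.filter (fun q => Q q.2) := by
  rw [pvGrp_items, pvGrp_items, List.filter_map]
  have hmapf : (l.filter (fun x => P (f x))).map f = (l.map f).filter P := by
    rw [List.filter_map]; rfl
  rw [hmapf, ofList_filter]
  have hfilters : ((PySem.Set.ofList (l.map f)).filter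
        ((fun (q : String × List String) => Q q.2) ∘ fun k => (k, l.filter (fun x => f x == k))))
      = (PySem.Set.ofList (l.map f)).filter P := by
    apply List.filter_congr
    intro k _
    simp only [Function.comp_def]
    exact (hPQ k).symm
  rw [hfilters]
  apply List.map_congr_left
  intro k hk
  have hPk : P k = true := List.of_mem_filter hk
  have hff : (l.filter (fun x => P (f x))).filter (fun x => f x == k)
      = l.filter (fun x => f x == k) := by
    rw [List.filter_filter]
    apply List.filter_congr
    intro x _
    by_cases hx : f x == k
    · have : f x = k := by simpa using hx
      simp [this, hPk]
    · simp only [Bool.not_eq_true] at hx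
      simp [hx]
  rw [hff]

theorem count_key (k : String) (f : String → String) (l : List String) :
    List.count k (l.map f) = (l.filter (fun x => f x == k)).length := by
  rw [List.count_eq_countP, List.countP_map, List.countP_eq_length_filter]
  rfl

theorem main_eq (l : List String) (keylen : Int) :
    create_keydict l keylen = create_keydict_alt l keylen := by
  have hnodup : (([] ++ (pvGrp (pvKey keylen) PySem.Dict.empty l).items).map Prod.fst).Nodup := by
    simp only [List.nil_append]
    have hk : (pvGrp (pvKey keylen) PySem.Dict.empty l).items.map Prod.fst
        = (pvGrp (pvKey keylen) PySem.Dict.empty l).keys := rfl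
    rw [hk, pvGrp_keys]
    exact PySem.Set.nodup_ofList _
  -- characterise A: its second loop partitions the grouped items by length
  have h2 := phase2 (pvGrp (pvKey keylen) PySem.Dict.empty l).items [] PySem.Dict.empty
    hnodup (fun q _ => PySem.Dict.contains_empty _)
  simp only [List.nil_append] at h2
  have hA : create_keydict l keylen
      = ((pvGrp (pvKey keylen) PySem.Dict.empty l).items.filter (fun q => !decide (1 < q.2.length)),
         (pvGrp (pvKey keylen) PySem.Dict.empty l).items.filter (fun q => decide (1 < q.2.length))) := by
    show (((((pvGrp (pvKey keylen) PySem.Dict.empty l).items.map Prod.fst).foldl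
        (fun (p : PySem.Dict String (List String) × PySem.Dict String (List String)) new_id =>
          let v := p.1.getD new_id []
          if 1 < v.length then (p.1.erase new_id, p.2.insert new_id v) else p)
        (PySem.Dict.mk (pvGrp (pvKey keylen) PySem.Dict.empty l).items, PySem.Dict.empty))).1.items,
       ((((pvGrp (pvKey keylen) PySem.Dict.empty l).items.map Prod.fst).foldl
        (fun (p : PySem.Dict String (List String) × PySem.Dict String (List String)) new_id =>
          let v := p.1.getD new_id []
          if 1 < v.length then (p.1.erase new_id, p.2.insert new_id v) else p)
        (PySem.Dict.mk (pvGrp (pvKey keylen) PySem.Dict.empty l).items, PySem.Dict.empty))).2.items) = _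
    rw [h2]
    rfl
  -- characterise B: its single loop is two grouping loops over a partition of id_list
  have hstep : (fun (p : PySem.Dict String (List String) × PySem.Dict String (List String)) the_id =>
        if 1 < (PySem.Dict.counter (l.map (pvKey keylen))).getD (pvKey keylen the_id) 0 then
          (p.1, p.2.modify (pvKey keylen the_id) [] (· ++ [the_id]))
        else (p.1.modify (pvKey keylen the_id) [] (· ++ [the_id]), p.2))
      = (fun (p : PySem.Dict String (List String) × PySem.Dict String (List String)) x =>
        if (fun y => decide (1 < (PySem.Dict.counter (l.map (pvKey keylen))).getD (pvKey keylen y) 0)) x then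
          (p.1, p.2.modify (pvKey keylen x) [] (· ++ [x]))
        else (p.1.modify (pvKey keylen x) [] (· ++ [x]), p.2)) := by
    funext p x
    by_cases h : 1 < (PySem.Dict.counter (l.map (pvKey keylen))).getD (pvKey keylen x) 0 <;> simp only [h, decide_true, decide_false, if_true, Bool.false_eq_true, if_false]
  have hB : create_keydict_alt l keylen
      = ((pvGrp (pvKey keylen) PySem.Dict.empty
            (l.filter (fun x => !decide (1 < (PySem.Dict.counter (l.map (pvKey keylen))).getD (pvKey keylen x) 0)))).items,
         (pvGrp (pvKey keylen) PySem.Dict.empty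
            (l.filter (fun x => decide (1 < (PySem.Dict.counter (l.map (pvKey keylen))).getD (pvKey keylen x) 0)))).items) := by
    show ((l.foldl (fun (p : PySem.Dict String (List String) × PySem.Dict String (List String)) the_id =>
        if 1 < (PySem.Dict.counter (l.map (pvKey keylen))).getD (pvKey keylen the_id) 0 then
          (p.1, p.2.modify (pvKey keylen the_id) [] (· ++ [the_id]))
        else (p.1.modify (pvKey keylen the_id) [] (· ++ [the_id]), p.2))
        (PySem.Dict.empty, PySem.Dict.empty)).1.items,
      (l.foldl (fun (p : PySem.Dict String (List String) × PySem.Dict String (List String)) the_id =>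
        if 1 < (PySem.Dict.counter (l.map (pvKey keylen))).getD (pvKey keylen the_id) 0 then
          (p.1, p.2.modify (pvKey keylen the_id) [] (· ++ [the_id]))
        else (p.1.modify (pvKey keylen the_id) [] (· ++ [the_id]), p.2))
        (PySem.Dict.empty, PySem.Dict.empty)).2.items) = _
    rw [hstep, phase1B (pvKey keylen)
      (fun y => decide (1 < (PySem.Dict.counter (l.map (pvKey keylen))).getD (pvKey keylen y) 0)) l
      PySem.Dict.empty PySem.Dict.empty]
  -- the two characterisations coincide, key by key
  have hPQ : ∀ (k : String),
      (1 < (PySem.Dict.counter (l.map (pvKey keylen))).getD k 0)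
        ↔ (1 < (l.filter (fun x => pvKey keylen x == k)).length) := by
    intro k
    rw [PySem.Dict.getD_counter, count_key k (pvKey keylen) l]
    exact_mod_cast Iff.rfl
  have hkeep := split_lemma (pvKey keylen) l
    (fun k => !decide (1 < (PySem.Dict.counter (l.map (pvKey keylen))).getD k 0))
    (fun v => !decide (1 < v.length))
    (fun k => by simp only [decide_eq_decide.mpr (hPQ k)])
  have hmove := split_lemma (pvKey keylen) l
    (fun k => decide (1 < (PySem.Dict.counter (l.map (pvKey keylen))).getD k 0))
    (fun v => decide (1 < v.length))
    (fun k => by simp only [decide_eq_decide.mpr (hPQ k)])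
  rw [hA, hB, hkeep, hmove]

-- ===== VERDICT (by name: the statement is the Claim_ definition above) =====
theorem create_keydict_spec : Claim_equal_create_keydict :=
  fun id_list keylen _ => main_eq id_list keylen
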